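-- pv_equiv track=rewrite | github.com/felixdigit/short_gravity | _ARCHIVE_V1/scripts/data-fetchers/archive/patent_coverage_report.py | get_jurisdiction
-- ===== SOURCE A (Python) =====
-- def get_jurisdiction(patent_number):
--     """Extract jurisdiction from patent number."""
--     if not patent_number:
--         return "UNKNOWN"
--     pn = patent_number.upper()
--     for prefix in ["US", "EP", "WO", "JP", "KR", "AU", "CA", "CN", "DK", "ES", "GB", "DE", "FR"]:
--         if pn.startswith(prefix):
--             return prefix
--     return "OTHER"
-- ===== SOURCE B (Python) =====
-- # Two-level character trie: first letter -> allowed second letters.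
-- _TRIE = {"U": "S", "E": "PS", "W": "O", "J": "P", "K": "R",
--          "A": "U", "C": "AN", "D": "KE", "G": "B", "F": "R"}
--
--
-- def get_jurisdiction(patent_number):
--     """Extract jurisdiction from patent number."""
--     if not patent_number:
--         return "UNKNOWN"
--     head = patent_number[:2].upper()
--     if len(head) < 2:
--         return "OTHER"
--     c0, c1 = head
--     if c1 in _TRIE.get(c0, ""):
--         return head
--     return "OTHER"
-- ===== Notes on version B (the rewrite author's own statement) =====
-- stated objective: alternative
-- what changed: Replaces A's first-match startswith scan over the 13 two-letter prefixes with a two-level character trie (dict: first letter -> string of admissible second letters), deciding character by character and rebuilding the answer from the two characters; correct because the prefixes are exactly two characters and pairwise distinct.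
import Mathlib
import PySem

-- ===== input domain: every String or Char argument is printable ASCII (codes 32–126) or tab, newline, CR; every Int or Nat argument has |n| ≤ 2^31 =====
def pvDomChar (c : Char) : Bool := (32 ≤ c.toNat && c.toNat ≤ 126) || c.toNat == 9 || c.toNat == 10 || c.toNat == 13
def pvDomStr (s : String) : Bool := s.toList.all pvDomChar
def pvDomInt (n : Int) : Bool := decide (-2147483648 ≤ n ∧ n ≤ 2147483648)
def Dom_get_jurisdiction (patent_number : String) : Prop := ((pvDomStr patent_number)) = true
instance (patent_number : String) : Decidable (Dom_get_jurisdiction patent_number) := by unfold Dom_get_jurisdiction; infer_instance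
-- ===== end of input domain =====

-- B replaces A's first-match startswith scan over the 13 whole prefixes with a two-level
-- character trie (first letter -> allowed second letters), deciding character by character;
-- equal because every prefix is exactly two characters and they are pairwise distinct.

-- ===== PORT A =====
-- the for-loop over the prefix list: return the first prefix pn starts with, else "OTHER"
def juriLoop (pn : String) : List String → String
  | [] => "OTHER"
  | p :: rest => if PySem.Str.startswith pn p then p else juriLoop pn rest

def get_jurisdiction (patent_number : String) : String :=
  if PySem.Str.len patent_number = 0 then "UNKNOWN"
  else juriLoop (PySem.Str.upper patent_number)
    ["US", "EP", "WO", "JP", "KR", "AU", "CA", "CN", "DK", "ES", "GB", "DE", "FR"]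

-- ===== PORT B =====
-- the two-level trie: first letter -> string of admissible second letters
def juriTrie : PySem.Dict Char String :=
  PySem.Dict.ofList [('U', "S"), ('E', "PS"), ('W', "O"), ('J', "P"), ('K', "R"),
                     ('A', "U"), ('C', "AN"), ('D', "KE"), ('G', "B"), ('F', "R")]

def get_jurisdiction_alt (patent_number : String) : String :=
  if PySem.Str.len patent_number = 0 then "UNKNOWN"
  else
    let head := PySem.Str.upper (PySem.Str.slice patent_number none (some 2))
    if PySem.Str.len head < 2 then "OTHER"
    else
      -- 'c0, c1 = head' (head has exactly two characters here)
      match head.toList with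
      | [c0, c1] =>
          if PySem.Chars.isIn [c1] (PySem.Dict.getD juriTrie c0 "").toList then head else "OTHER"
      | _ => "OTHER"

-- ===== PRECONDITION & SPEC =====
def Spec_get_jurisdiction (patent_number : String) (out : String) : Prop := out = get_jurisdiction_alt patent_number
instance (patent_number : String) (out : String) : Decidable (Spec_get_jurisdiction patent_number out) := by unfold Spec_get_jurisdiction; infer_instance

-- ===== CLAIM (what is proved, stated in full; the proofs are below) =====
def Claim_equal_get_jurisdiction : Prop := ∀ (patent_number : String), Dom_get_jurisdiction patent_number → Spec_get_jurisdiction patent_number (get_jurisdiction patent_number)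

-- ===== LEMMAS AND PROOFS =====

-- a 2-character startswith is equality of the 2-character take
lemma sw2 (pn p : String) (hp : p.toList.length = 2) :
    PySem.Str.startswith pn p = decide (pn.toList.take 2 = p.toList) := by
  have h : (PySem.Str.startswith pn p = true) ↔ pn.toList.take 2 = p.toList := by
    rw [show PySem.Str.startswith pn p = PySem.Chars.startswith pn.toList p.toList by simp,
      PySem.Chars.startswith_iff, List.prefix_iff_eq_take, hp, eq_comm]
  rw [Bool.eq_iff_iff, h, decide_eq_true_iff]

-- upper commutes with the 2-slice: head's characters are the first two of upper(s)
lemma head_toList (s : String) :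
    (PySem.Str.upper (PySem.Str.slice s none (some 2))).toList =
      (PySem.Str.upper s).toList.take 2 := by
  simp [PySem.Str.toList_upper, PySem.Str.toList_slice, PySem.Chars.upper]
  rw [show (2:Int) = ((2:Nat):Int) from rfl, PySem.List.slice_to_natCast, List.map_take]

-- singleton infix is membership
lemma infix_singleton {c : Char} {l : List Char} : ([c] <:+: l) ↔ c ∈ l := by
  constructor
  · intro h; exact h.mem (by simp)
  · intro h
    obtain ⟨l1, l2, rfl⟩ := List.append_of_mem h
    exact ⟨l1, l2, by simp⟩

-- the trie lookup, written out as an if-chain on the first character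
lemma trieEq : juriTrie =
    ((((((((((PySem.Dict.empty.insert 'U' "S").insert 'E' "PS").insert 'W' "O").insert 'J' "P").insert 'K' "R").insert 'A' "U").insert 'C' "AN").insert 'D' "KE").insert 'G' "B").insert 'F' "R") := by decide

lemma trieGetD (c0 : Char) : PySem.Dict.getD juriTrie c0 "" =
    (     if c0 = 'F' then "R" else if c0 = 'G' then "B" else if c0 = 'D' then "KE"
     else if c0 = 'C' then "AN" else if c0 = 'A' then "U" else if c0 = 'K' then "R"
     else if c0 = 'J' then "P" else if c0 = 'W' then "O" else if c0 = 'E' then "PS"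
     else if c0 = 'U' then "S" else "") := by
  rw [trieEq]
  simp only [PySem.Dict.getD_insert, PySem.Dict.getD_empty]

-- B's trie test, characterised as the 13-case disjunction
lemma cond_iff (c0 c1 : Char) :
    (PySem.Chars.isIn [c1] (PySem.Dict.getD juriTrie c0 "").toList = true) ↔
    ([c0,c1] = ['U','S'] ∨ [c0,c1] = ['E','P'] ∨ [c0,c1] = ['W','O'] ∨ [c0,c1] = ['J','P'] ∨
     [c0,c1] = ['K','R'] ∨ [c0,c1] = ['A','U'] ∨ [c0,c1] = ['C','A'] ∨ [c0,c1] = ['C','N'] ∨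
     [c0,c1] = ['D','K'] ∨ [c0,c1] = ['E','S'] ∨ [c0,c1] = ['G','B'] ∨ [c0,c1] = ['D','E'] ∨
     [c0,c1] = ['F','R']) := by
  rw [PySem.Chars.isIn_iff_infix, infix_singleton, trieGetD]
  split_ifs with h1 h2 h3 h4 h5 h6 h7 h8 h9 h10 <;>
    simp_all [show ("R" : String).toList = ['R'] from rfl,
      show ("B" : String).toList = ['B'] from rfl,
      show ("KE" : String).toList = ['K','E'] from rfl,
      show ("AN" : String).toList = ['A','N'] from rfl,
      show ("U" : String).toList = ['U'] from rfl,
      show ("P" : String).toList = ['P'] from rfl,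
      show ("O" : String).toList = ['O'] from rfl,
      show ("PS" : String).toList = ['P','S'] from rfl,
      show ("S" : String).toList = ['S'] from rfl,
      show ("" : String).toList = [] from rfl]

-- A's if-chain over t = key.toList equals the 13-case disjunction form, for any t
lemma core (key : String) (t : List Char) (hkt : key.toList = t) :
    (     if t = ['U','S'] then "US"
     else if t = ['E','P'] then "EP"
     else if t = ['W','O'] then "WO"
     else if t = ['J','P'] then "JP"
     else if t = ['K','R'] then "KR"
     else if t = ['A','U'] then "AU"
     else if t = ['C','A'] then "CA"
     else if t = ['C','N'] then "CN"
     else if t = ['D','K'] then "DK"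
     else if t = ['E','S'] then "ES"
     else if t = ['G','B'] then "GB"
     else if t = ['D','E'] then "DE"
     else if t = ['F','R'] then "FR"
     else "OTHER") =
    (if (t = ['U','S'] ∨ t = ['E','P'] ∨ t = ['W','O'] ∨ t = ['J','P'] ∨ t = ['K','R'] ∨ t = ['A','U'] ∨ t = ['C','A'] ∨ t = ['C','N'] ∨ t = ['D','K'] ∨ t = ['E','S'] ∨ t = ['G','B'] ∨ t = ['D','E'] ∨ t = ['F','R']) then key else "OTHER") := by
  by_cases h1 : t = ['U','S']
  · simp [h1, String.ext_iff, hkt]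
  by_cases h2 : t = ['E','P']
  · simp [h2, String.ext_iff, hkt]
  by_cases h3 : t = ['W','O']
  · simp [h3, String.ext_iff, hkt]
  by_cases h4 : t = ['J','P']
  · simp [h4, String.ext_iff, hkt]
  by_cases h5 : t = ['K','R']
  · simp [h5, String.ext_iff, hkt]
  by_cases h6 : t = ['A','U']
  · simp [h6, String.ext_iff, hkt]
  by_cases h7 : t = ['C','A']
  · simp [h7, String.ext_iff, hkt]
  by_cases h8 : t = ['C','N']
  · simp [h8, String.ext_iff, hkt]
  by_cases h9 : t = ['D','K']
  · simp [h9, String.ext_iff, hkt]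
  by_cases h10 : t = ['E','S']
  · simp [h10, String.ext_iff, hkt]
  by_cases h11 : t = ['G','B']
  · simp [h11, String.ext_iff, hkt]
  by_cases h12 : t = ['D','E']
  · simp [h12, String.ext_iff, hkt]
  by_cases h13 : t = ['F','R']
  · simp [h13, String.ext_iff, hkt]
  simp [h1, h2, h3, h4, h5, h6, h7, h8, h9, h10, h11, h12, h13]

-- A, rewritten as the if-chain over the first two characters of upper(s)
lemma A_chain (s : String) (h0 : ¬ PySem.Str.len s = 0) :
    get_jurisdiction s =
    (let t := (PySem.Str.upper s).toList.take 2;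
          if t = ['U','S'] then "US"
     else if t = ['E','P'] then "EP"
     else if t = ['W','O'] then "WO"
     else if t = ['J','P'] then "JP"
     else if t = ['K','R'] then "KR"
     else if t = ['A','U'] then "AU"
     else if t = ['C','A'] then "CA"
     else if t = ['C','N'] then "CN"
     else if t = ['D','K'] then "DK"
     else if t = ['E','S'] then "ES"
     else if t = ['G','B'] then "GB"
     else if t = ['D','E'] then "DE"
     else if t = ['F','R'] then "FR"
     else "OTHER") := by
  unfold get_jurisdiction
  rw [if_neg h0]
  set pn := PySem.Str.upper s with hpn
  rw [juriLoop, juriLoop, juriLoop, juriLoop, juriLoop, juriLoop, juriLoop, juriLoop,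
    juriLoop, juriLoop, juriLoop, juriLoop, juriLoop,
    sw2 pn "US" (by decide), sw2 pn "EP" (by decide), sw2 pn "WO" (by decide),
    sw2 pn "JP" (by decide), sw2 pn "KR" (by decide), sw2 pn "AU" (by decide),
    sw2 pn "CA" (by decide), sw2 pn "CN" (by decide), sw2 pn "DK" (by decide),
    sw2 pn "ES" (by decide), sw2 pn "GB" (by decide), sw2 pn "DE" (by decide),
    sw2 pn "FR" (by decide), juriLoop]
  simp only [decide_eq_true_eq,
    show "US".toList = ['U','S'] from rfl, show "EP".toList = ['E','P'] from rfl,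
    show "WO".toList = ['W','O'] from rfl, show "JP".toList = ['J','P'] from rfl,
    show "KR".toList = ['K','R'] from rfl, show "AU".toList = ['A','U'] from rfl,
    show "CA".toList = ['C','A'] from rfl, show "CN".toList = ['C','N'] from rfl,
    show "DK".toList = ['D','K'] from rfl, show "ES".toList = ['E','S'] from rfl,
    show "GB".toList = ['G','B'] from rfl, show "DE".toList = ['D','E'] from rfl,
    show "FR".toList = ['F','R'] from rfl]

-- B's body after the emptiness guard, reduced to the same if-chain
lemma main_eq (head : String) (t : List Char) (hht : head.toList = t) (hle : t.length ≤ 2) :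
    (if PySem.Str.len head < 2 then "OTHER"
     else match head.toList with
       | [c0, c1] =>
           if PySem.Chars.isIn [c1] (PySem.Dict.getD juriTrie c0 "").toList then head else "OTHER"
       | _ => "OTHER") =
    (     if t = ['U','S'] then "US"
     else if t = ['E','P'] then "EP"
     else if t = ['W','O'] then "WO"
     else if t = ['J','P'] then "JP"
     else if t = ['K','R'] then "KR"
     else if t = ['A','U'] then "AU"
     else if t = ['C','A'] then "CA"
     else if t = ['C','N'] then "CN"
     else if t = ['D','K'] then "DK"
     else if t = ['E','S'] then "ES"
     else if t = ['G','B'] then "GB"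
     else if t = ['D','E'] then "DE"
     else if t = ['F','R'] then "FR"
     else "OTHER") := by
  have hl : head.length = t.length := by
    rw [← String.length_toList, hht]
  rcases t with _ | ⟨c0, _ | ⟨c1, _ | ⟨x, r⟩⟩⟩
  · simp [hl]
  · simp [hl]
  · rw [if_neg (by simp [hl]), hht]
    rw [core head [c0, c1] hht]
    by_cases hc : PySem.Chars.isIn [c1] (PySem.Dict.getD juriTrie c0 "").toList = true
    · show (if PySem.Chars.isIn [c1] (PySem.Dict.getD juriTrie c0 "").toList then head
        else "OTHER") = _
      rw [if_pos hc, if_pos ((cond_iff c0 c1).mp hc)]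
    · show (if PySem.Chars.isIn [c1] (PySem.Dict.getD juriTrie c0 "").toList then head
        else "OTHER") = _
      rw [if_neg (by simpa using hc), if_neg (fun h => hc ((cond_iff c0 c1).mpr h))]
  · simp at hle

-- ===== VERDICT (by name: the statement is the Claim_ definition above) =====
theorem get_jurisdiction_spec : Claim_equal_get_jurisdiction := by
  intro s _
  unfold Spec_get_jurisdiction
  by_cases h0 : PySem.Str.len s = 0
  · unfold get_jurisdiction get_jurisdiction_alt
    rw [if_pos h0, if_pos h0]
  · rw [A_chain s h0]
    have hB : get_jurisdiction_alt s =
        (if PySem.Str.len (PySem.Str.upper (PySem.Str.slice s none (some 2))) < 2 then "OTHER"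
         else match (PySem.Str.upper (PySem.Str.slice s none (some 2))).toList with
           | [c0, c1] =>
               if PySem.Chars.isIn [c1] (PySem.Dict.getD juriTrie c0 "").toList then
                 PySem.Str.upper (PySem.Str.slice s none (some 2))
               else "OTHER"
           | _ => "OTHER") := by
      unfold get_jurisdiction_alt
      rw [if_neg h0]
    rw [hB, main_eq _ _ (head_toList s) (List.length_take_le 2 _)]
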